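-- pv_equiv track=rewrite | github.com/Tendo1904/osa-benchmark | benchmark/merger.py | _find
-- ===== SOURCE A (Python) =====
-- def _find(repo, file, method_id):
--     items = repo.get(file, [])
--
--     # 1. точный матч
--     for i in items:
--         if i["id"] == method_id:
--             return i["doc"]
--
--     # 2. fallback: только имя метода
--     short = method_id.split(".")[-1]
--
--     for i in items:
--         if i["id"].endswith(short):
--             return i["doc"]
--
--     return None
-- ===== SOURCE B (Python) =====
-- def _find(repo, file, method_id):
--     # single traversal selecting the ITEM (exact match breaks; first suffix
--     # match is recorded as a fallback); the "doc" read is deferred to the end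
--     short = method_id.split(".")[-1]
--     best = None
--     for item in repo.get(file, []):
--         ident = item["id"]
--         if ident == method_id:
--             best = item
--             break
--         if best is None and ident.endswith(short):
--             best = item
--     return best["doc"] if best is not None else None
-- ===== Notes on version B (the rewrite author's own statement) =====
-- stated objective: alternative
-- what changed: A's two staged scans (exact-id pass, then suffix pass) become a single traversal that selects the item itself: an exact match breaks out immediately, the first suffix match is kept as a fallback item, and the 'doc' lookup happens once after the loop.
import Mathlib
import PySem

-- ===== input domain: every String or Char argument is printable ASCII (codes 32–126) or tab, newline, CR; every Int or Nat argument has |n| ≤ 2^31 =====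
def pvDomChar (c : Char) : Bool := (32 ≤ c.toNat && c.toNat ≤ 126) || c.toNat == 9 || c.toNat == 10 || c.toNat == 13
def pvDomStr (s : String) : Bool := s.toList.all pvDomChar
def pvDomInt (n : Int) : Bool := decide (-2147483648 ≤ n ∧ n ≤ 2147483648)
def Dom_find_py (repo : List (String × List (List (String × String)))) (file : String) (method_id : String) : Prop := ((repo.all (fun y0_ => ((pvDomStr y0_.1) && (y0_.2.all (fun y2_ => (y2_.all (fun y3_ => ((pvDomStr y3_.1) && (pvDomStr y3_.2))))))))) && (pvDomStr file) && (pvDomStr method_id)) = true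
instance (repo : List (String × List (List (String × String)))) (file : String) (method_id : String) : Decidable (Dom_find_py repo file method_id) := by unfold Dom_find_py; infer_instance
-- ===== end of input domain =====

-- B replaces A's two staged scans by one traversal that selects the item (exact match breaks,
-- first suffix match kept as fallback) and reads "doc" once afterwards (objective: alternative).

-- ===== PORT A =====
-- first loop of A: return i["doc"] at the first exact id match (inner Option: missing "doc")
def findA_loop1 (items : List (List (String × String))) (mid : String) : Option (Option String) :=
  match items with
  | [] => none
  | i :: rest =>
      if (PySem.Dict.mk i).get? "id" = some mid then some ((PySem.Dict.mk i).get? "doc")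
      else findA_loop1 rest mid

-- second loop of A: return i["doc"] at the first id ending with `short`
def findA_loop2 (items : List (List (String × String))) (short : String) : Option (Option String) :=
  match items with
  | [] => none
  | i :: rest =>
      if PySem.Str.endswith (((PySem.Dict.mk i).get? "id").getD "") short then
        some ((PySem.Dict.mk i).get? "doc")
      else findA_loop2 rest short

def find_py (repo : List (String × List (List (String × String)))) (file : String) (method_id : String) : Option String :=
  let items := ((PySem.Dict.mk repo).get? file).getD []
  match findA_loop1 items method_id with
  | some r => r
  | none =>
      let short := PySem.List.pyGetD ((PySem.Str.split? method_id ".").getD []) (-1) ""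
      match findA_loop2 items short with
      | some r => r
      | none => none

-- ===== PORT B =====
-- B's single loop: select the ITEM — break with the item at an exact match, otherwise
-- remember the first suffix-matching item; no "doc" access inside the loop
def findB_scan (items : List (List (String × String))) (mid : String) (short : String)
    (best : Option (List (String × String))) : Option (List (String × String)) :=
  match items with
  | [] => best
  | item :: rest =>
      let ident? := (PySem.Dict.mk item).get? "id"
      if ident? = some mid then some item
      else if best.isNone && PySem.Str.endswith (ident?.getD "") short then
        findB_scan rest mid short (some item)
      else findB_scan rest mid short best

def find_py_alt (repo : List (String × List (List (String × String)))) (file : String) (method_id : String) : Option String :=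
  let short := PySem.List.pyGetD ((PySem.Str.split? method_id ".").getD []) (-1) ""
  match findB_scan (((PySem.Dict.mk repo).get? file).getD []) method_id short none with
  | some best => (PySem.Dict.mk best).get? "doc"
  | none => none

-- ===== PRECONDITION & SPEC =====
-- Pre_ excludes exactly the inputs where the Python raises KeyError: an item read before the
-- first exact-id match lacks an "id" key (when there is no exact match, every item's "id" is
-- read), or the selected item (first exact match, else first suffix match) lacks a "doc" key.
def Pre_find_py (repo : List (String × List (List (String × String)))) (file : String) (method_id : String) : Prop :=
  let items := ((PySem.Dict.mk repo).get? file).getD []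
  let short := PySem.List.pyGetD ((PySem.Str.split? method_id ".").getD []) (-1) ""
  let exactP := fun j => (PySem.Dict.mk j).get? "id" == some method_id
  (∀ i ∈ items, items.find? exactP = some i →
      (∀ j ∈ items.takeWhile (fun j => !exactP j), ((PySem.Dict.mk j).get? "id").isSome = true) ∧
      ((PySem.Dict.mk i).get? "doc").isSome = true) ∧
  (items.find? exactP = none →
      (∀ j ∈ items, ((PySem.Dict.mk j).get? "id").isSome = true) ∧
      (∀ i ∈ items,
        items.find? (fun j => PySem.Str.endswith (((PySem.Dict.mk j).get? "id").getD "") short) = some i →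
        ((PySem.Dict.mk i).get? "doc").isSome = true))
instance (repo : List (String × List (List (String × String)))) (file : String) (method_id : String) : Decidable (Pre_find_py repo file method_id) := by unfold Pre_find_py; infer_instance

def pvWitness_find_py : (List (String × List (List (String × String)))) × String × String :=
  ([("f", [[("id", "x.b"), ("doc", "S")], [("id", "a.b"), ("doc", "E")]])], "f", "a.b")

def Spec_find_py (repo : List (String × List (List (String × String)))) (file : String) (method_id : String) (out : Option String) : Prop := out = find_py_alt repo file method_id
instance (repo : List (String × List (List (String × String)))) (file : String) (method_id : String) (out : Option String) : Decidable (Spec_find_py repo file method_id out) := by unfold Spec_find_py; infer_instance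

-- ===== CLAIM (what is proved, stated in full; the proofs are below) =====
def Claim_equal_find_py : Prop := ∀ (repo : List (String × List (List (String × String)))) (file : String) (method_id : String), Dom_find_py repo file method_id → Pre_find_py repo file method_id → Spec_find_py repo file method_id (find_py repo file method_id)

-- ===== LEMMAS AND PROOFS =====

-- Reading "doc" from B's selected item equals A's staged result: first exact match's doc,
-- else the accumulated fallback's doc, else the first suffix match's doc.
theorem findB_scan_doc (mid short : String) :
    ∀ (items : List (List (String × String))) (best : Option (List (String × String))),
      (match findB_scan items mid short best with
       | some b => (PySem.Dict.mk b).get? "doc"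
       | none => none) =
      match findA_loop1 items mid with
      | some r => r
      | none =>
          match best with
          | some b => (PySem.Dict.mk b).get? "doc"
          | none => match findA_loop2 items short with | some r => r | none => none := by
  intro items
  induction items with
  | nil => intro best; cases best <;> simp [findB_scan, findA_loop1, findA_loop2]
  | cons i rest ih =>
      intro best
      by_cases hx : (PySem.Dict.mk i).get? "id" = some mid
      · simp [findB_scan, findA_loop1, hx]
      · by_cases he : PySem.Chars.endswith (((PySem.Dict.mk i).get? "id").getD "").toList short.toList = true
        · cases best with
          | none => simp [findB_scan, findA_loop1, findA_loop2, PySem.Str.endswith, hx, he, ih]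
          | some b => simp [findB_scan, findA_loop1, PySem.Str.endswith, hx, he, ih]
        · cases best with
          | none => simp [findB_scan, findA_loop1, findA_loop2, PySem.Str.endswith, hx, he, ih]
          | some b => simp [findB_scan, findA_loop1, PySem.Str.endswith, hx, he, ih]

-- ===== VERDICT (by name: the statement is the Claim_ definition above) =====
theorem find_py_spec : Claim_equal_find_py := by
  intro repo file method_id _ _
  unfold Spec_find_py find_py find_py_alt
  rw [findB_scan_doc]
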